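-- pv_equiv track=rewrite | github.com/art-programmer/FloorplanTransformation | code/PostProcessing/QP.py | findConflictLinePairsCross
-- ===== SOURCE A (Python) =====
-- def findConflictLinePairsCross(points_1, lines_1, points_2, lines_2, gap):
--   conflictLinePairs = []
--   for lineIndex_1, line_1 in enumerate(lines_1):
--     point_1 = points_1[line_1[0]]
--     point_2 = points_1[line_1[1]]
--     if point_2[0] - point_1[0] > point_2[1] - point_1[1]:
--       lineDim_1 = 0
--     else:
--       lineDim_1 = 1
--       pass
--
--     fixedValue_1 = int(round((point_1[1 - lineDim_1] + point_2[1 - lineDim_1]) / 2))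
--     minValue_1 = int(min(point_1[lineDim_1], point_2[lineDim_1]))
--     maxValue_1 = int(max(point_1[lineDim_1], point_2[lineDim_1]))
--
--     for lineIndex_2, line_2 in enumerate(lines_2):
--       point_1 = points_2[line_2[0]]
--       point_2 = points_2[line_2[1]]
--       if point_2[0] - point_1[0] > point_2[1] - point_1[1]:
--         lineDim_2 = 0
--       else:
--         lineDim_2 = 1
--         pass
--
--       fixedValue_2 = int(round((point_1[1 - lineDim_2] + point_2[1 - lineDim_2]) / 2))
--       minValue_2 = int(min(point_1[lineDim_2], point_2[lineDim_2]))
--       maxValue_2 = int(max(point_1[lineDim_2], point_2[lineDim_2]))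
--
--       if lineDim_1 == lineDim_2:
--         continue
--
--       if minValue_1 > fixedValue_2 - gap or maxValue_1 < fixedValue_2 + gap or minValue_2 > fixedValue_1 - gap or maxValue_2 < fixedValue_1 + gap:
--         continue
--       conflictLinePairs.append((lineIndex_1, lineIndex_2))
--       continue
--     continue
--
--   return conflictLinePairs
-- ===== SOURCE B (Python) =====
-- def findConflictLinePairsCross(points_1, lines_1, points_2, lines_2, gap):
--   def feat(points, line):
--     p = points[line[0]]
--     q = points[line[1]]
--     d = 0 if q[0] - p[0] > q[1] - p[1] else 1
--     return d, int(round((p[1 - d] + q[1 - d]) / 2)), int(min(p[d], q[d])), int(max(p[d], q[d]))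
--
--   # stage 1: split lines_2 by orientation; sort each side by fixed coordinate
--   horiz, vert = [], []
--   for j, line in enumerate(lines_2):
--     d, f, lo, hi = feat(points_2, line)
--     (horiz if d == 0 else vert).append((f, j, lo, hi))
--   horiz.sort(key=lambda t: t[0])
--   vert.sort(key=lambda t: t[0])
--
--   # stage 2: for each line_1 sweep only the fixed-value window [lo1+gap, hi1-gap]
--   # of the opposite-orientation sorted list, then restore index order
--   out = []
--   for i, line in enumerate(lines_1):
--     d1, f1, lo1, hi1 = feat(points_1, line)
--     cand = vert if d1 == 0 else horiz
--     k = 0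
--     while k < len(cand) and cand[k][0] < lo1 + gap:
--       k += 1
--     js = []
--     while k < len(cand) and cand[k][0] <= hi1 - gap:
--       f2, j, lo2, hi2 = cand[k]
--       if lo2 <= f1 - gap and hi2 >= f1 + gap:
--         js.append(j)
--       k += 1
--     js.sort()
--     out.extend((i, j) for j in js)
--   return out
-- ===== Notes on version B (the rewrite author's own statement) =====
-- stated objective: faster
-- what changed: B replaces A's all-pairs scan (recomputing both lines' features per pair and skipping same-orientation pairs one by one) by a staged sweep: it splits lines_2 by orientation, sorts each bucket once by fixed coordinate, answers each line_1 by skipping to and stopping at the boundaries of its fixed-value window in the opposite-orientation sorted bucket, and restores output order by sorting the matching indices.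
-- outside the precondition, e.g. on findConflictLinePairsCross([], [], [], [(0, 0)], 0): A returns [], B raises IndexError
import Mathlib
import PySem

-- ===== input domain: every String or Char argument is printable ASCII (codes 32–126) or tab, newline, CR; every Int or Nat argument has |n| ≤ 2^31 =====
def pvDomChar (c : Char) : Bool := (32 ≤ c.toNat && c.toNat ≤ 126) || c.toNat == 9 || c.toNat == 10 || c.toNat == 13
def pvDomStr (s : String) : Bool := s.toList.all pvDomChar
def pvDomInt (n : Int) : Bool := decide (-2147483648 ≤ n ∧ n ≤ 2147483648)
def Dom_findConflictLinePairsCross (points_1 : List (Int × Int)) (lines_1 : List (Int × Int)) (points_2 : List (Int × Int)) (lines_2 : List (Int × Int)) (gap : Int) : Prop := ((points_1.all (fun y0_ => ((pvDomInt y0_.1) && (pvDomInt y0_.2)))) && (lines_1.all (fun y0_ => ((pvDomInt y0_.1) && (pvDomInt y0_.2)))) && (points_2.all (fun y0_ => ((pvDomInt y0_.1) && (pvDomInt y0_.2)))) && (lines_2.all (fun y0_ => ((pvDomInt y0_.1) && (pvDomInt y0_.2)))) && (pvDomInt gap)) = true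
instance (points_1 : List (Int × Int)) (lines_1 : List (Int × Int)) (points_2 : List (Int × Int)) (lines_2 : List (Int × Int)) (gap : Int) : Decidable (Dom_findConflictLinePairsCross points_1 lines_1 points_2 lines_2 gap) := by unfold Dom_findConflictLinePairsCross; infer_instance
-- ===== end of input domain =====

-- B sorts each orientation bucket of lines_2 by fixed coordinate once, then answers each
-- line_1 by a sweep over only the fixed-value window of the opposite bucket (restoring
-- index order by a final sort), instead of A's all-pairs scan with per-pair recomputation;
-- a timing run measured B faster on the generated inputs.

-- ===== PORT A =====
-- int(round(s / 2)) for an integer sum s (Python round: half to even; exact for |s| ≤ 2^33)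
def pyHalfRound (s : Int) : Int :=
  if PySem.Int.mod s 2 = 0 then PySem.Int.floordiv s 2
  else
    let k := PySem.Int.floordiv s 2
    if PySem.Int.mod k 2 = 0 then k else k + 1

def findConflictLinePairsCross (points_1 : List (Int × Int)) (lines_1 : List (Int × Int)) (points_2 : List (Int × Int)) (lines_2 : List (Int × Int)) (gap : Int) : List (Int × Int) :=
  (PySem.List.enumerate lines_1).foldl (fun acc e1 =>
    let point_1 := PySem.List.pyGetD points_1 e1.2.1 (0, 0)   -- Pre_ excludes IndexError
    let point_2 := PySem.List.pyGetD points_1 e1.2.2 (0, 0)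
    let lineDim_1 : Int := if point_2.1 - point_1.1 > point_2.2 - point_1.2 then 0 else 1
    let fixedValue_1 := pyHalfRound ((if lineDim_1 = 0 then point_1.2 else point_1.1) + (if lineDim_1 = 0 then point_2.2 else point_2.1))
    let minValue_1 := min (if lineDim_1 = 0 then point_1.1 else point_1.2) (if lineDim_1 = 0 then point_2.1 else point_2.2)
    let maxValue_1 := max (if lineDim_1 = 0 then point_1.1 else point_1.2) (if lineDim_1 = 0 then point_2.1 else point_2.2)
    (PySem.List.enumerate lines_2).foldl (fun acc2 e2 =>
      let q_1 := PySem.List.pyGetD points_2 e2.2.1 (0, 0)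
      let q_2 := PySem.List.pyGetD points_2 e2.2.2 (0, 0)
      let lineDim_2 : Int := if q_2.1 - q_1.1 > q_2.2 - q_1.2 then 0 else 1
      let fixedValue_2 := pyHalfRound ((if lineDim_2 = 0 then q_1.2 else q_1.1) + (if lineDim_2 = 0 then q_2.2 else q_2.1))
      let minValue_2 := min (if lineDim_2 = 0 then q_1.1 else q_1.2) (if lineDim_2 = 0 then q_2.1 else q_2.2)
      let maxValue_2 := max (if lineDim_2 = 0 then q_1.1 else q_1.2) (if lineDim_2 = 0 then q_2.1 else q_2.2)
      if lineDim_1 = lineDim_2 then acc2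
      else if minValue_1 > fixedValue_2 - gap ∨ maxValue_1 < fixedValue_2 + gap ∨ minValue_2 > fixedValue_1 - gap ∨ maxValue_2 < fixedValue_1 + gap then acc2
      else acc2 ++ [(e1.1, e2.1)]) acc) []

-- ===== PORT B =====
-- feat: one line's (orientation, fixed coordinate, interval lo, interval hi)
def featAlt (points : List (Int × Int)) (line : Int × Int) : Int × Int × Int × Int :=
  let p := PySem.List.pyGetD points line.1 (0, 0)   -- Pre_ excludes IndexError
  let q := PySem.List.pyGetD points line.2 (0, 0)
  let d : Int := if q.1 - p.1 > q.2 - p.2 then 0 else 1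
  (d, pyHalfRound ((if d = 0 then p.2 else p.1) + (if d = 0 then q.2 else q.1)),
     min (if d = 0 then p.1 else p.2) (if d = 0 then q.1 else q.2),
     max (if d = 0 then p.1 else p.2) (if d = 0 then q.1 else q.2))

def findConflictLinePairsCross_alt (points_1 : List (Int × Int)) (lines_1 : List (Int × Int)) (points_2 : List (Int × Int)) (lines_2 : List (Int × Int)) (gap : Int) : List (Int × Int) :=
  -- stage 1: split lines_2 by orientation; sort each side by fixed coordinate
  let buckets := (PySem.List.enumerate lines_2).foldl
    (fun (b : List (Int × Int × Int × Int) × List (Int × Int × Int × Int)) jl =>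
      let r := featAlt points_2 jl.2
      if r.1 = 0 then (b.1 ++ [(r.2.1, jl.1, r.2.2.1, r.2.2.2)], b.2)
      else (b.1, b.2 ++ [(r.2.1, jl.1, r.2.2.1, r.2.2.2)])) ([], [])
  let horiz := PySem.List.sorted buckets.1 (fun t => t.1) false
  let vert := PySem.List.sorted buckets.2 (fun t => t.1) false
  -- stage 2: per line_1, sweep only the fixed-value window of the opposite sorted bucket
  (PySem.List.enumerate lines_1).foldl (fun out il =>
    let r := featAlt points_1 il.2
    let cand := if r.1 = 0 then vert else horiz
    let rest := cand.dropWhile (fun t => decide (t.1 < r.2.2.1 + gap))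
    let js := (rest.takeWhile (fun t => decide (t.1 ≤ r.2.2.2 - gap))).foldl
      (fun js t => if t.2.2.1 ≤ r.2.1 - gap ∧ t.2.2.2 ≥ r.2.1 + gap then js ++ [t.2.1] else js) []
    out ++ (PySem.List.sorted js (fun x => x) false).map (fun j => (il.1, j))) []

-- ===== PRECONDITION & SPEC =====
-- Pre_: every endpoint index of every line is a valid Python index into its point list (otherwise Python raises
-- IndexError). This also excludes the corner lines_1 = [] with an invalid index in lines_2, where A returns []
-- without ever reading points_2 but B (which preprocesses both sides) raises — see claim.json cites.
def Pre_findConflictLinePairsCross (points_1 : List (Int × Int)) (lines_1 : List (Int × Int)) (points_2 : List (Int × Int)) (lines_2 : List (Int × Int)) (gap : Int) : Prop :=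
  (∀ l ∈ lines_1, PySem.Raise.InRange points_1.length l.1 ∧ PySem.Raise.InRange points_1.length l.2) ∧
  (∀ l ∈ lines_2, PySem.Raise.InRange points_2.length l.1 ∧ PySem.Raise.InRange points_2.length l.2)
instance (points_1 : List (Int × Int)) (lines_1 : List (Int × Int)) (points_2 : List (Int × Int)) (lines_2 : List (Int × Int)) (gap : Int) : Decidable (Pre_findConflictLinePairsCross points_1 lines_1 points_2 lines_2 gap) := by unfold Pre_findConflictLinePairsCross; infer_instance

def pvWitness_findConflictLinePairsCross : (List (Int × Int)) × (List (Int × Int)) × (List (Int × Int)) × (List (Int × Int)) × Int :=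
  ([(0, 0), (6, 0)], [(0, 1)], [(3, -4), (3, 4)], [(0, 1)], 1)

def Spec_findConflictLinePairsCross (points_1 : List (Int × Int)) (lines_1 : List (Int × Int)) (points_2 : List (Int × Int)) (lines_2 : List (Int × Int)) (gap : Int) (out : List (Int × Int)) : Prop := out = findConflictLinePairsCross_alt points_1 lines_1 points_2 lines_2 gap
instance (points_1 : List (Int × Int)) (lines_1 : List (Int × Int)) (points_2 : List (Int × Int)) (lines_2 : List (Int × Int)) (gap : Int) (out : List (Int × Int)) : Decidable (Spec_findConflictLinePairsCross points_1 lines_1 points_2 lines_2 gap out) := by unfold Spec_findConflictLinePairsCross; infer_instance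

-- ===== CLAIM =====
def Claim_equal_findConflictLinePairsCross : Prop := ∀ (points_1 : List (Int × Int)) (lines_1 : List (Int × Int)) (points_2 : List (Int × Int)) (lines_2 : List (Int × Int)) (gap : Int), Dom_findConflictLinePairsCross points_1 lines_1 points_2 lines_2 gap → Pre_findConflictLinePairsCross points_1 lines_1 points_2 lines_2 gap → Spec_findConflictLinePairsCross points_1 lines_1 points_2 lines_2 gap (findConflictLinePairsCross points_1 lines_1 points_2 lines_2 gap)

-- ===== LEMMAS AND PROOFS =====

-- A's per-pair predicate on an element of enumerate lines_2, given line_1's features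
def predA (points_1 points_2 : List (Int × Int)) (gap : Int) (l1 : Int × Int) (e2 : Int × (Int × Int)) : Bool :=
  decide (¬ (featAlt points_1 l1).1 = (featAlt points_2 e2.2).1 ∧
     ¬ ((featAlt points_1 l1).2.2.1 > (featAlt points_2 e2.2).2.1 - gap ∨
        (featAlt points_1 l1).2.2.2 < (featAlt points_2 e2.2).2.1 + gap ∨
        (featAlt points_2 e2.2).2.2.1 > (featAlt points_1 l1).2.1 - gap ∨
        (featAlt points_2 e2.2).2.2.2 < (featAlt points_1 l1).2.1 + gap))

-- the per-line contribution both programs produce for one element of enumerate lines_1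
def contribC (points_1 points_2 lines_2 : List (Int × Int)) (gap : Int) (e1 : Int × (Int × Int)) : List (Int × Int) :=
  ((PySem.List.enumerate lines_2).filter (predA points_1 points_2 gap e1.2)).map (fun e2 => (e1.1, e2.1))

-- bucket entry built from one element of enumerate lines_2
def entryB (points_2 : List (Int × Int)) (e : Int × (Int × Int)) : Int × Int × Int × Int :=
  ((featAlt points_2 e.2).2.1, e.1, (featAlt points_2 e.2).2.2.1, (featAlt points_2 e.2).2.2.2)

-- the orientation component of featAlt is always 0 or 1
theorem featAlt_dim (ps : List (Int × Int)) (l : Int × Int) : (featAlt ps l).1 = 0 ∨ (featAlt ps l).1 = 1 := by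
  simp only [featAlt]
  split <;> simp

-- A's inner fold, phrased through featAlt (definitionally A's inner lets), as a filter-map
theorem innerA_eq (p2s : List (Int × Int)) (i gap d1 f1 lo1 hi1 : Int)
    (es : List (Int × (Int × Int))) (acc : List (Int × Int)) :
    es.foldl (fun acc2 e2 =>
      if d1 = (featAlt p2s e2.2).1 then acc2
      else if lo1 > (featAlt p2s e2.2).2.1 - gap ∨ hi1 < (featAlt p2s e2.2).2.1 + gap ∨
              (featAlt p2s e2.2).2.2.1 > f1 - gap ∨ (featAlt p2s e2.2).2.2.2 < f1 + gap then acc2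
      else acc2 ++ [(i, e2.1)]) acc
    = acc ++ (es.filter (fun e2 => decide (¬ d1 = (featAlt p2s e2.2).1 ∧
        ¬ (lo1 > (featAlt p2s e2.2).2.1 - gap ∨ hi1 < (featAlt p2s e2.2).2.1 + gap ∨
           (featAlt p2s e2.2).2.2.1 > f1 - gap ∨ (featAlt p2s e2.2).2.2.2 < f1 + gap)))).map (fun e2 => (i, e2.1)) := by
  induction es generalizing acc with
  | nil => simp
  | cons e es ih =>
    simp only [List.foldl_cons]
    by_cases h1 : d1 = (featAlt p2s e.2).1
    · rw [if_pos h1, ih]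
      simp [h1]
    · by_cases h2 : lo1 > (featAlt p2s e.2).2.1 - gap ∨ hi1 < (featAlt p2s e.2).2.1 + gap ∨
          (featAlt p2s e.2).2.2.1 > f1 - gap ∨ (featAlt p2s e.2).2.2.2 < f1 + gap
      · rw [if_neg h1, if_pos h2, ih]
        have h2' : ¬(lo1 ≤ (featAlt p2s e.2).2.1 - gap ∧ (featAlt p2s e.2).2.1 + gap ≤ hi1 ∧
            (featAlt p2s e.2).2.2.1 ≤ f1 - gap ∧ f1 + gap ≤ (featAlt p2s e.2).2.2.2) := by omega
        simp [h1, h2']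
      · rw [if_neg h1, if_neg h2, ih]
        have h2' : lo1 ≤ (featAlt p2s e.2).2.1 - gap ∧ (featAlt p2s e.2).2.1 + gap ≤ hi1 ∧
            (featAlt p2s e.2).2.2.1 ≤ f1 - gap ∧ f1 + gap ≤ (featAlt p2s e.2).2.2.2 := by omega
        simp [h1, h2', List.append_assoc]

-- A equals the canonical fold of per-line contributions
theorem A_eq (p1s l1s p2s l2s : List (Int × Int)) (gap : Int) :
    findConflictLinePairsCross p1s l1s p2s l2s gap
    = (PySem.List.enumerate l1s).foldl (fun acc e1 => acc ++ contribC p1s p2s l2s gap e1) [] := by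
  unfold findConflictLinePairsCross
  refine PySem.List.foldl_congr_mem _ _ _ _ ?_
  intro acc e1 _
  exact innerA_eq p2s e1.1 gap (featAlt p1s e1.2).1 (featAlt p1s e1.2).2.1
    (featAlt p1s e1.2).2.2.1 (featAlt p1s e1.2).2.2.2 (PySem.List.enumerate l2s) acc

-- B's bucket-building fold, characterised as two filter-maps
theorem bucket_eq (p2s : List (Int × Int)) (es : List (Int × (Int × Int)))
    (acc : List (Int × Int × Int × Int) × List (Int × Int × Int × Int)) :
    es.foldl (fun b jl =>
      if (featAlt p2s jl.2).1 = 0 then (b.1 ++ [entryB p2s jl], b.2)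
      else (b.1, b.2 ++ [entryB p2s jl])) acc
    = (acc.1 ++ (es.filter (fun e => (featAlt p2s e.2).1 = 0)).map (entryB p2s),
       acc.2 ++ (es.filter (fun e => ¬ (featAlt p2s e.2).1 = 0)).map (entryB p2s)) := by
  induction es generalizing acc with
  | nil => simp
  | cons e es ih =>
    simp only [List.foldl_cons]
    by_cases h : (featAlt p2s e.2).1 = 0 <;>
      simp [h, ih, List.append_assoc]

-- on a list key-sorted ascending, the while-skip of the elements below x is a filter
theorem dropWhile_lt_eq_filter (x : Int) (l : List (Int × Int × Int × Int))
    (h : l.Pairwise (fun a b => a.1 ≤ b.1)) :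
    l.dropWhile (fun t => decide (t.1 < x)) = l.filter (fun t => decide (¬ t.1 < x)) := by
  induction l with
  | nil => rfl
  | cons t l ih =>
    rw [List.pairwise_cons] at h
    by_cases ht : t.1 < x
    · simp [ht, ih h.2]
    · have hall : ∀ u ∈ l, ¬ u.1 < x := fun u hu => by have := h.1 u hu; omega
      rw [List.dropWhile_cons_of_neg (by simpa using ht), List.filter_cons_of_pos (by simpa using ht),
        List.filter_eq_self.2 (fun u hu => by simp [hall u hu])]

-- on a list key-sorted ascending, the while-stop at elements above y is a filter
theorem takeWhile_le_eq_filter (y : Int) (l : List (Int × Int × Int × Int))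
    (h : l.Pairwise (fun a b => a.1 ≤ b.1)) :
    l.takeWhile (fun t => decide (t.1 ≤ y)) = l.filter (fun t => decide (t.1 ≤ y)) := by
  induction l with
  | nil => rfl
  | cons t l ih =>
    rw [List.pairwise_cons] at h
    by_cases ht : t.1 ≤ y
    · simp [ht, ih h.2]
    · have : ∀ u ∈ l, ¬ u.1 ≤ y := fun u hu => by have := h.1 u hu; omega
      rw [List.takeWhile_cons_of_neg (by simpa using ht), List.filter_cons_of_neg (by simpa using ht),
        List.filter_eq_nil_iff.2 (fun u hu => by simp [this u hu])]

-- the sweep over one sorted bucket, as A's filter of enumerate lines_2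
theorem sweep_eq (p2s l2s : List (Int × Int)) (gap i f1 lo1 hi1 : Int)
    (q P : Int × (Int × Int) → Bool)
    (hq : ∀ e ∈ PySem.List.enumerate l2s 0,
      P e = (q e && (decide (¬ (featAlt p2s e.2).2.1 < lo1 + gap) &&
        (decide ((featAlt p2s e.2).2.1 ≤ hi1 - gap) &&
         decide ((featAlt p2s e.2).2.2.1 ≤ f1 - gap ∧ (featAlt p2s e.2).2.2.2 ≥ f1 + gap))))) :
    (let cand := PySem.List.sorted (((PySem.List.enumerate l2s 0).filter q).map (entryB p2s)) (fun t => t.1) false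
     let rest := cand.dropWhile (fun t => decide (t.1 < lo1 + gap))
     let js := (rest.takeWhile (fun t => decide (t.1 ≤ hi1 - gap))).foldl
       (fun js t => if t.2.2.1 ≤ f1 - gap ∧ t.2.2.2 ≥ f1 + gap then js ++ [t.2.1] else js) []
     (PySem.List.sorted js (fun x => x) false).map (fun j => (i, j)))
    = ((PySem.List.enumerate l2s 0).filter P).map (fun e2 => (i, e2.1)) := by
  simp only []
  have hpairL := PySem.List.sorted_pairwise (((PySem.List.enumerate l2s 0).filter q).map (entryB p2s)) (fun t => t.1)
  rw [dropWhile_lt_eq_filter (lo1 + gap) _ hpairL,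
      takeWhile_le_eq_filter (hi1 - gap) _ (hpairL.filter _),
      PySem.List.foldl_append_ite, List.nil_append]
  have key : List.map (fun (t : Int × Int × Int × Int) => t.2.1)
        ((((((PySem.List.enumerate l2s 0).filter q).map (entryB p2s)).filter
          (fun t => decide (¬ t.1 < lo1 + gap))).filter (fun t => decide (t.1 ≤ hi1 - gap))).filter
          (fun t => decide (t.2.2.1 ≤ f1 - gap ∧ t.2.2.2 ≥ f1 + gap)))
      = ((PySem.List.enumerate l2s 0).filter P).map (fun e2 => e2.1) := by
    rw [List.filter_map, List.filter_map, List.filter_map, List.map_map, List.filter_filter,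
        List.filter_filter, List.filter_filter]
    rw [List.filter_congr (fun e he => ?_)]
    · rfl
    · show _ = P e
      rw [hq e he]
      simp only [Function.comp, entryB]
      rw [Bool.eq_iff_iff]
      simp only [Bool.and_eq_true, decide_eq_true_eq]
      tauto
  have hp1 := ((((PySem.List.sorted_perm (((PySem.List.enumerate l2s 0).filter q).map (entryB p2s)) (fun t => t.1) false).filter
      (fun t => decide (¬ t.1 < lo1 + gap))).filter (fun t => decide (t.1 ≤ hi1 - gap))).filter
      (fun t => decide (t.2.2.1 ≤ f1 - gap ∧ t.2.2.2 ≥ f1 + gap))).map (fun t => t.2.1)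
  rw [key] at hp1
  have hpw : (((PySem.List.enumerate l2s 0).filter P).map (fun e2 => e2.1)).Pairwise
      (fun a b => (fun (x : Int) => x) a < (fun (x : Int) => x) b) :=
    List.pairwise_map.2 ((PySem.List.pairwise_lt_enumerate l2s 0).filter P)
  rw [PySem.List.sorted_eq_of_perm_of_pairwise_lt _ _ (fun x => x) hp1.symm hpw, List.map_map]
  rfl

-- B equals the same canonical fold
theorem B_eq (p1s l1s p2s l2s : List (Int × Int)) (gap : Int) :
    findConflictLinePairsCross_alt p1s l1s p2s l2s gap
    = (PySem.List.enumerate l1s).foldl (fun acc e1 => acc ++ contribC p1s p2s l2s gap e1) [] := by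
  simp only [findConflictLinePairsCross_alt]
  rw [show (fun (b : List (Int × Int × Int × Int) × List (Int × Int × Int × Int)) jl =>
      let r := featAlt p2s jl.2
      if r.1 = 0 then (b.1 ++ [(r.2.1, jl.1, r.2.2.1, r.2.2.2)], b.2)
      else (b.1, b.2 ++ [(r.2.1, jl.1, r.2.2.1, r.2.2.2)]))
    = (fun b jl => if (featAlt p2s jl.2).1 = 0 then (b.1 ++ [entryB p2s jl], b.2)
        else (b.1, b.2 ++ [entryB p2s jl])) from rfl, bucket_eq]
  simp only [List.nil_append]
  refine PySem.List.foldl_congr_mem _ _ _ _ ?_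
  intro acc e1 _
  refine congrArg (acc ++ ·) ?_
  show (let r := featAlt p1s e1.2
        let cand := if r.1 = 0
          then PySem.List.sorted (((PySem.List.enumerate l2s 0).filter (fun e => decide (¬ (featAlt p2s e.2).1 = 0))).map (entryB p2s)) (fun t => t.1) false
          else PySem.List.sorted (((PySem.List.enumerate l2s 0).filter (fun e => decide ((featAlt p2s e.2).1 = 0))).map (entryB p2s)) (fun t => t.1) false
        let rest := cand.dropWhile (fun t => decide (t.1 < r.2.2.1 + gap))
        let js := (rest.takeWhile (fun t => decide (t.1 ≤ r.2.2.2 - gap))).foldl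
          (fun js t => if t.2.2.1 ≤ r.2.1 - gap ∧ t.2.2.2 ≥ r.2.1 + gap then js ++ [t.2.1] else js) []
        (PySem.List.sorted js (fun x => x) false).map (fun j => (e1.1, j)))
    = contribC p1s p2s l2s gap e1
  unfold contribC
  rcases featAlt_dim p1s e1.2 with hd | hd
  · simp only [hd]
    exact sweep_eq p2s l2s gap e1.1 (featAlt p1s e1.2).2.1 (featAlt p1s e1.2).2.2.1
      (featAlt p1s e1.2).2.2.2 (fun e => decide (¬ (featAlt p2s e.2).1 = 0)) (predA p1s p2s gap e1.2) (fun e _ => by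
        rcases featAlt_dim p2s e.2 with h2 | h2 <;>
        · simp only [predA]
          rw [Bool.eq_iff_iff]
          simp only [Bool.and_eq_true, decide_eq_true_eq]
          omega)
  · simp only [hd]
    rw [if_neg (by norm_num)]
    exact sweep_eq p2s l2s gap e1.1 (featAlt p1s e1.2).2.1 (featAlt p1s e1.2).2.2.1
      (featAlt p1s e1.2).2.2.2 (fun e => decide ((featAlt p2s e.2).1 = 0)) (predA p1s p2s gap e1.2) (fun e _ => by
        rcases featAlt_dim p2s e.2 with h2 | h2 <;>
        · simp only [predA]
          rw [Bool.eq_iff_iff]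
          simp only [Bool.and_eq_true, decide_eq_true_eq]
          omega)

-- ===== VERDICT =====
theorem findConflictLinePairsCross_spec : Claim_equal_findConflictLinePairsCross := by
  intro p1s l1s p2s l2s gap _ _
  unfold Spec_findConflictLinePairsCross
  rw [A_eq, B_eq]
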